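-- pv_equiv track=rewrite | github.com/dwatersonIO/BibleTools3 | BibleTools2/chapterBAK.py | get_text_indices
-- ===== SOURCE A (Python) =====
-- def get_text_indices(chap_verse_indices, chapter_length):
--     '''
--     Appends the start and end indices of actual verse text to new list
--     of tuples called text_indices which is then returned
--     As parameter takes CHAP_VERSE_INDICES list and CHAPTER_LENGTH integer
--     (origina    l string from docx)
--
--     '''
--     text_indices=[]
--     for index, _ in enumerate(chap_verse_indices, 1):
--         # Uses enumerate to iterate over tuples in chap_verse_indices
--         # Dont need to use enumerate but useful in case later want to use
--         # index for some reason
--         # last parameter starts index 1 instead of default of 0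
--
--         number_of_verses = len(chap_verse_indices)
--         if index == number_of_verses:
--             # if processing last tuple then text indices will be from he 2nd number
--             # the previous tuple (hence [index-1]) to the end of the string '''
--
--             start = 1 + chap_verse_indices[index-1][1]
--             # Add 1 to get rid of initial space after verse number
--
--             text_indices.append((start, chapter_length))
--             # Using chapter_length passed to function to get index of last char in string
--
--         else:
--             start = 1 + chap_verse_indices[index-1][1]
--             # the text is found in the 2nd number [1] in the previous pair thus Index-1[1]
--             # Add 1 to get rid of initial space after verse number
--
--             end = chap_verse_indices[index][0]
--             # ends with the 1st number [0] in the current pair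
--
--             text_indices.append((start, end))
--
--     return text_indices
-- ===== SOURCE B (Python) =====
-- def get_text_indices(chap_verse_indices, chapter_length):
--     # Build the result back-to-front: walk the verse markers in reverse,
--     # threading the current text-end boundary through an accumulator.
--     out = []
--     end = chapter_length
--     for start, stop in reversed(chap_verse_indices):
--         out.append((1 + stop, end))
--         end = start
--     out.reverse()
--     return out
-- ===== Notes on version B (the rewrite author's own statement) =====
-- stated objective: alternative
-- what changed: B builds the result back-to-front: a single reverse traversal threads the current text-end boundary (initially chapter_length, then each element's start index) through an accumulator, so no peeking at the next element, no length/index arithmetic and no last-iteration branch; the accumulated list is reversed at the end.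
import Mathlib
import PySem

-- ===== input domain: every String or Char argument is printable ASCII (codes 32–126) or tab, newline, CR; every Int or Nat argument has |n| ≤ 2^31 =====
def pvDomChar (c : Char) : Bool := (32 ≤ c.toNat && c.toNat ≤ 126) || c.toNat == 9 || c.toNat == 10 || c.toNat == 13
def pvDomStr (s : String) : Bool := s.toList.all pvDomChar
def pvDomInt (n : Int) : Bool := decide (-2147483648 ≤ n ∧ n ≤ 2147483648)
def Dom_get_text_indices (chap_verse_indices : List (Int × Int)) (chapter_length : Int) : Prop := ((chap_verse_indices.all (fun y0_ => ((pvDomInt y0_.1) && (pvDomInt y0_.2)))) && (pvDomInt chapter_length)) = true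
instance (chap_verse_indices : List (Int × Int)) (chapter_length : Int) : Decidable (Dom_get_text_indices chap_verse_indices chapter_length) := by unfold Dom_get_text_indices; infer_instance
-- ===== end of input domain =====

-- B builds the result back-to-front: one reverse traversal threads the current text-end
-- boundary through an accumulator (no index arithmetic, no last-iteration branch); same O(n).


-- ===== PORT A =====
-- transliteration of A's loop over enumerate(chap_verse_indices, 1); the indices index-1, index
-- are always in range when accessed, so pyGetD's default (0,0) is never used (A never raises)
def get_text_indices (chap_verse_indices : List (Int × Int)) (chapter_length : Int) : List (Int × Int) :=
  (PySem.List.enumerate chap_verse_indices 1).foldl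
    (fun text_indices p =>
      let index := p.1
      let number_of_verses : Int := (chap_verse_indices.length : Int)
      if index == number_of_verses then
        let start := 1 + (PySem.List.pyGetD chap_verse_indices (index - 1) (0, 0)).2
        text_indices ++ [(start, chapter_length)]
      else
        let start := 1 + (PySem.List.pyGetD chap_verse_indices (index - 1) (0, 0)).2
        let «end» := (PySem.List.pyGetD chap_verse_indices index (0, 0)).1
        text_indices ++ [(start, «end»)]) []

-- ===== PORT B =====
-- transliteration of Source B: fold over the reversed list carrying (out, end); reverse at the end
def get_text_indices_alt (chap_verse_indices : List (Int × Int)) (chapter_length : Int) : List (Int × Int) :=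
  (chap_verse_indices.reverse.foldl
    (fun (acc : List (Int × Int) × Int) se => (acc.1 ++ [(1 + se.2, acc.2)], se.1))
    ([], chapter_length)).1.reverse

-- ===== PRECONDITION & SPEC =====
def Spec_get_text_indices (chap_verse_indices : List (Int × Int)) (chapter_length : Int) (out : List (Int × Int)) : Prop := out = get_text_indices_alt chap_verse_indices chapter_length
instance (chap_verse_indices : List (Int × Int)) (chapter_length : Int) (out : List (Int × Int)) : Decidable (Spec_get_text_indices chap_verse_indices chapter_length out) := by unfold Spec_get_text_indices; infer_instance

-- ===== CLAIM (what is proved, stated in full; the proofs are below) =====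
def Claim_equal_get_text_indices : Prop := ∀ (chap_verse_indices : List (Int × Int)) (chapter_length : Int), Dom_get_text_indices chap_verse_indices chapter_length → Spec_get_text_indices chap_verse_indices chapter_length (get_text_indices chap_verse_indices chapter_length)

-- ===== LEMMAS AND PROOFS =====

-- intermediate form both programs are reduced to: interior tuples from adjacent pairs + tail tuple
def pvZipForm (xs : List (Int × Int)) (L : Int) : List (Int × Int) :=
  match xs with
  | [] => []
  | x :: rest =>
    ((x :: rest).zip rest).map (fun ab => (1 + ab.1.2, ab.2.1))
      ++ [(1 + ((x :: rest).getLast (by simp)).2, L)]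

def pvStep (acc : List (Int × Int) × Int) (se : Int × Int) : List (Int × Int) × Int :=
  (acc.1 ++ [(1 + se.2, acc.2)], se.1)

theorem pvFold_fst (ys : List (Int × Int)) : ∀ (a : List (Int × Int)) (e : Int),
    (ys.foldl pvStep (a, e)).1 = a ++ (ys.foldl pvStep ([], e)).1 := by
  induction ys with
  | nil => intro a e; simp
  | cons z ys ih =>
    intro a e
    simp only [List.foldl_cons, pvStep]
    rw [ih (a ++ [(1 + z.2, e)]) z.1, ih ([] ++ [(1 + z.2, e)]) z.1]
    simp

theorem pvFold_snd (ys : List (Int × Int)) : ∀ (a : List (Int × Int)) (e : Int),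
    (ys.foldl pvStep (a, e)).2 = (ys.getLast?.elim e Prod.fst) := by
  induction ys with
  | nil => intro a e; simp
  | cons z ys ih =>
    intro a e
    simp only [List.foldl_cons, pvStep]
    rw [ih]
    cases ys with
    | nil => simp
    | cons w ws =>
      obtain ⟨q, hq⟩ := Option.isSome_iff_exists.mp
        (by simp : (w :: ws).getLast?.isSome = true)
      simp [List.getLast?_cons_cons, hq]

theorem pvAlt_cons (x : Int × Int) (rest : List (Int × Int)) (L : Int) :
    get_text_indices_alt (x :: rest) L =
      (1 + x.2, rest.head?.elim L Prod.fst) :: get_text_indices_alt rest L := by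
  show ((x :: rest).reverse.foldl pvStep ([], L)).1.reverse
      = (1 + x.2, rest.head?.elim L Prod.fst) :: (rest.reverse.foldl pvStep ([], L)).1.reverse
  rw [List.reverse_cons, List.foldl_append]
  simp only [List.foldl_cons, List.foldl_nil, pvStep]
  rw [pvFold_fst _ _ L]
  rw [pvFold_snd]
  have hl : rest.reverse.getLast? = rest.head? := by
    cases rest with
    | nil => simp
    | cons r rs => simp [List.getLast?_reverse]
  rw [hl]
  simp

theorem pvZipForm_cons (x : Int × Int) (rest : List (Int × Int)) (L : Int) :
    pvZipForm (x :: rest) L =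
      (1 + x.2, rest.head?.elim L Prod.fst) :: pvZipForm rest L := by
  cases rest with
  | nil => simp [pvZipForm]
  | cons y rs =>
    simp only [pvZipForm, List.zip_cons_cons, List.map_cons, List.head?_cons, Option.elim]
    rw [List.getLast_cons (by simp)]
    simp

theorem pvAlt_eq_zipForm (xs : List (Int × Int)) (L : Int) :
    get_text_indices_alt xs L = pvZipForm xs L := by
  induction xs with
  | nil => rfl
  | cons x rest ih => rw [pvAlt_cons, pvZipForm_cons, ih]

theorem get_text_indices_eq_map (xs : List (Int × Int)) (L : Int) :
    get_text_indices xs L =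
      (PySem.List.enumerate xs 1).map (fun p =>
        if p.1 == (xs.length : Int) then
          (1 + (PySem.List.pyGetD xs (p.1 - 1) (0, 0)).2, L)
        else
          (1 + (PySem.List.pyGetD xs (p.1 - 1) (0, 0)).2,
            (PySem.List.pyGetD xs p.1 (0, 0)).1)) := by
  unfold get_text_indices
  have hbody : (fun (text_indices : List (Int × Int)) (p : Int × (Int × Int)) =>
      let index := p.1
      let number_of_verses : Int := (xs.length : Int)
      if index == number_of_verses then
        let start := 1 + (PySem.List.pyGetD xs (index - 1) (0, 0)).2
        text_indices ++ [(start, L)]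
      else
        let start := 1 + (PySem.List.pyGetD xs (index - 1) (0, 0)).2
        let «end» := (PySem.List.pyGetD xs index (0, 0)).1
        text_indices ++ [(start, «end»)]) =
      (fun acc p => acc ++ [if p.1 == (xs.length : Int) then
          (1 + (PySem.List.pyGetD xs (p.1 - 1) (0, 0)).2, L)
        else
          (1 + (PySem.List.pyGetD xs (p.1 - 1) (0, 0)).2,
            (PySem.List.pyGetD xs p.1 (0, 0)).1)]) := by
    funext acc p
    by_cases h : p.1 == (xs.length : Int) <;> simp [h]
  rw [hbody, PySem.List.foldl_append_singleton_eq_map]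
  simp

theorem get_text_indices_eq_zipForm (xs : List (Int × Int)) (L : Int) :
    get_text_indices xs L = pvZipForm xs L := by
  rw [get_text_indices_eq_map]
  cases xs with
  | nil => simp [pvZipForm]
  | cons x rest =>
    apply List.ext_getElem
    · simp [pvZipForm, PySem.List.length_enumerate]
    · intro k hk hk'
      rw [List.getElem_map, PySem.List.getElem_enumerate]
      have hk1 : k < rest.length + 1 := by
        have := hk; simpa [PySem.List.length_enumerate] using this
      by_cases hlast : k = rest.length
      · subst hlast
        have hbe : (1 + (rest.length : Int) == ((x :: rest).length : Int)) = true := by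
          simp; ring
        simp only [hbe, if_pos]
        have hidx : (1 : Int) + (rest.length : Int) - 1 = ((rest.length : Nat) : Int) := by ring
        rw [hidx, PySem.List.pyGetD_natCast]
        simp only [pvZipForm]
        rw [List.getElem_append_right (by simp [List.length_zip])]
        simp [List.length_zip, List.getLast_eq_getElem]
        rfl
      · have hklt : k < rest.length := by omega
        have hbe : (1 + (k : Int) == ((x :: rest).length : Int)) = false := by
          simp; omega
        simp only [hbe, Bool.false_eq_true, if_neg, not_false_eq_true]
        have hidx : (1 : Int) + (k : Int) - 1 = ((k : Nat) : Int) := by ring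
        have hidx2 : (1 : Int) + (k : Int) = ((k + 1 : Nat) : Int) := by push_cast; ring
        rw [hidx, hidx2, PySem.List.pyGetD_natCast, PySem.List.pyGetD_natCast]
        simp only [pvZipForm]
        rw [List.getElem_append_left (by simp [List.length_zip, List.length_cons]; omega)]
        rw [List.getElem_map, List.getElem_zip]
        have h1 : (x :: rest)[k]? = some (x :: rest)[k] :=
          List.getElem?_eq_getElem (by simp; omega)
        simp [h1, hklt]
        rfl

-- ===== VERDICT (by name: the statement is the Claim_ definition above) =====
theorem get_text_indices_spec : Claim_equal_get_text_indices := by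
  intro xs L _
  show get_text_indices xs L = get_text_indices_alt xs L
  rw [get_text_indices_eq_zipForm, pvAlt_eq_zipForm]
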